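-- pv_equiv track=rewrite | github.com/xiuixb/M2U_Transpiler | src/presentation/controller.py | _summarize_error
-- ===== SOURCE A (Python) =====
-- def _summarize_error(error: str) -> str:
--     lines = [line.strip() for line in error.splitlines() if line.strip()]
--     if not lines:
--         return "运行失败。"
--     for line in reversed(lines):
--         if not line.startswith("File "):
--             return f"运行失败：{line}"
--     return f"运行失败：{lines[-1]}"
-- ===== SOURCE B (Python) =====
-- def _summarize_error(error: str) -> str:
--     candidate = None
--     last = None
--     for raw in error.splitlines():
--         line = raw.strip()
--         if not line:
--             continue
--         last = line
--         if not line.startswith("File "):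
--             candidate = line
--     if candidate is not None:
--         return f"运行失败：{candidate}"
--     if last is not None:
--         return f"运行失败：{last}"
--     return "运行失败。"
-- ===== Notes on version B (the rewrite author's own statement) =====
-- stated objective: alternative
-- what changed: Replaces A's build-a-filtered-list-then-reverse-scan-with-early-exit by a single forward pass over the raw lines that maintains two accumulators (the most recent non-'File ' line and the most recent non-empty line), with no intermediate list.
import Mathlib
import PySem

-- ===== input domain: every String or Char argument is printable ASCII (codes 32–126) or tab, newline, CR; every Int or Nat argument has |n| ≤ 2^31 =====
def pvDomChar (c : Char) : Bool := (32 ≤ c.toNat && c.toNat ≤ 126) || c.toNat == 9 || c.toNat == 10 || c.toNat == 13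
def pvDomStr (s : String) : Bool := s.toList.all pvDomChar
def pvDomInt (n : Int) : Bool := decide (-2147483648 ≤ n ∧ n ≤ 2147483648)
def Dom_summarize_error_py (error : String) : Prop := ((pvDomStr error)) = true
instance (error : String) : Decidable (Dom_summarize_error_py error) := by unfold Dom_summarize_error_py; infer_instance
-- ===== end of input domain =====

-- ===== PORT A =====
-- B differs from A only in decomposition: one forward accumulator pass instead of
-- build-filtered-list + reverse scan. Return values proved equal on all of Dom.

-- 'for line in reversed(lines): if not line.startswith("File "): return f"运行失败：{line}"'
def seLoopA : List String → Option String
  | [] => none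
  | l :: rest =>
    if !(PySem.Str.startswith l "File ") then some ("运行失败：" ++ l)
    else seLoopA rest

def summarize_error_py (error : String) : String :=
  let lines := ((PySem.Str.splitlines error).map PySem.Str.strip).filter (fun l => !(l == ""))
  if lines = [] then "运行失败。"
  else
    match seLoopA lines.reverse with
    | some r => r
    -- lines[-1]; in range: this branch has lines ≠ []
    | none => "运行失败：" ++ PySem.List.pyGetD lines (-1) ""

-- ===== PORT B =====
-- one fold step of the forward pass: state = (candidate, last)
def seStepB (st : Option String × Option String) (raw : String) : Option String × Option String :=
  let line := PySem.Str.strip raw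
  if line == "" then st
  else ((if !(PySem.Str.startswith line "File ") then some line else st.1), some line)

def summarize_error_py_alt (error : String) : String :=
  let st := (PySem.Str.splitlines error).foldl seStepB (none, none)
  match st.1 with
  | some c => "运行失败：" ++ c
  | none =>
    match st.2 with
    | some l => "运行失败：" ++ l
    | none => "运行失败。"

-- ===== PRECONDITION & SPEC =====
def Spec_summarize_error_py (error : String) (out : String) : Prop := out = summarize_error_py_alt error
instance (error : String) (out : String) : Decidable (Spec_summarize_error_py error out) := by unfold Spec_summarize_error_py; infer_instance

-- ===== CLAIM (what is proved, stated in full; the proofs are below) =====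
def Claim_equal_summarize_error_py : Prop := ∀ (error : String), Dom_summarize_error_py error → Spec_summarize_error_py error (summarize_error_py error)

-- ===== LEMMAS AND PROOFS =====

-- the pure fold step on an already-stripped, non-empty line
def seG (st : Option String × Option String) (l : String) : Option String × Option String :=
  ((if !(PySem.Str.startswith l "File ") then some l else st.1), some l)

-- B's fold over raw lines = the pure fold over the stripped, non-empty lines
theorem seFold_eq (raws : List String) (st : Option String × Option String) :
    raws.foldl seStepB st
      = ((raws.map PySem.Str.strip).filter (fun l => !(l == ""))).foldl seG st := by
  induction raws generalizing st with
  | nil => rfl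
  | cons r rest ih =>
    by_cases h : PySem.Str.strip r = ""
    · simp [seStepB, h, ih]
    · simp [seStepB, seG, h, ih]

-- the fold's candidate component is A's reverse scan (modulo the message prefix)
theorem seCand_eq (L : List String) :
    seLoopA L.reverse
      = (L.foldl seG ((none : Option String), (none : Option String))).1.map
          (fun l => "运行失败：" ++ l) := by
  induction L using List.reverseRecOn with
  | nil => rfl
  | append_singleton M x ih =>
    simp only [List.reverse_append, List.reverse_singleton, List.singleton_append,
      List.foldl_append, List.foldl_cons, List.foldl_nil, seLoopA, seG]
    split_ifs <;> simp [ih]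

-- the fold's last component is the last element of L (or the initial value)
theorem seLast_eq (L : List String) (st : Option String × Option String) :
    (L.foldl seG st).2 = L.getLast?.or st.2 := by
  induction L using List.reverseRecOn with
  | nil => rfl
  | append_singleton M x ih =>
    simp [List.foldl_append, seG]

-- A's shape = B's shape, for any list of stripped non-empty lines
theorem seMain (L : List String) :
    (if L = [] then "运行失败。"
     else
       match seLoopA L.reverse with
       | some r => r
       | none => "运行失败：" ++ PySem.List.pyGetD L (-1) "")
    = (match (L.foldl seG ((none : Option String), (none : Option String))).1 with
       | some c => "运行失败：" ++ c
       | none =>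
         match (L.foldl seG ((none : Option String), (none : Option String))).2 with
         | some l => "运行失败：" ++ l
         | none => "运行失败。") := by
  induction L using List.reverseRecOn with
  | nil => rfl
  | append_singleton M x ih =>
    have hne : M ++ [x] ≠ [] := by simp
    rw [if_neg hne, seCand_eq, seLast_eq]
    simp only [List.getLast?_concat]
    cases h : (List.foldl seG (none, none) (M ++ [x])).1 with
    | none => simp [PySem.List.pyGetD_neg_one_append_singleton]
    | some c => simp

-- ===== VERDICT (by name: the statement is the Claim_ definition above) =====
theorem summarize_error_py_spec : Claim_equal_summarize_error_py := by
  intro error _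
  show summarize_error_py error = summarize_error_py_alt error
  unfold summarize_error_py summarize_error_py_alt
  rw [seFold_eq]
  exact seMain _
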